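-- pv_equiv track=rewrite | github.com/Haruite/u2_scripts | movie_remux.py | generate_remux_cmd
-- ===== SOURCE A (Python) =====
-- def generate_remux_cmd(track_count, track_info, flac_files, output_file, mkv_file):
--     tracker_order = []
--     audio_tracks = []
--     pcm_track_count = 0
--     language_options = []
--     for _ in range(track_count + 1):
--         if _ in track_info:
--             pcm_track_count += 1
--             tracker_order.append(f'{pcm_track_count}:0')
--             audio_tracks.append(str(_))
--             language_options.append(f'--language 0:{track_info[_]} "{flac_files[pcm_track_count - 1]}"')
--         else:
--             tracker_order.append(f'0:{_}')
--     tracker_order = ','.join(tracker_order)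
--     audio_tracks = '!' + ','.join(audio_tracks)
--     language_options = ' '.join(language_options)
--     return (f'mkvmerge -o "{output_file}" --track-order {tracker_order} '
--             f'-a {audio_tracks} "{mkv_file}" {language_options}')
-- ===== SOURCE B (Python) =====
-- def generate_remux_cmd(track_count, track_info, flac_files, output_file, mkv_file):
--     # Sort the PCM track numbers once (a set comprehension over the dict keys),
--     # then emit the track order by merging: runs of '0:j' gap entries between
--     # consecutive PCM tracks, instead of a per-index membership test.
--     pcm = sorted({k for k in track_info if 0 <= k <= track_count})
--     parts = []
--     prev = 0
--     for rank, t in enumerate(pcm, 1):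
--         parts += [f'0:{j}' for j in range(prev, t)]
--         parts.append(f'{rank}:0')
--         prev = t + 1
--     parts += [f'0:{j}' for j in range(prev, track_count + 1)]
--     tracker_order = ','.join(parts)
--     audio_tracks = '!' + ','.join(map(str, pcm))
--     language_options = ' '.join(
--         f'--language 0:{track_info[t]} "{flac_files[k]}"' for k, t in enumerate(pcm))
--     return (f'mkvmerge -o "{output_file}" --track-order {tracker_order} '
--             f'-a {audio_tracks} "{mkv_file}" {language_options}')
-- ===== Notes on version B (the rewrite author's own statement) =====
-- stated objective: alternative
-- what changed: A scans range(track_count+1) once, testing each index for dict membership and updating three accumulators with a running PCM counter; B never tests membership per index: it extracts and sorts the PCM track numbers from the dict keys, then produces the track order by merging sorted tracks with runs of gap entries between consecutive PCM tracks, and derives the audio list and language options from the sorted list directly.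
import Mathlib
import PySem

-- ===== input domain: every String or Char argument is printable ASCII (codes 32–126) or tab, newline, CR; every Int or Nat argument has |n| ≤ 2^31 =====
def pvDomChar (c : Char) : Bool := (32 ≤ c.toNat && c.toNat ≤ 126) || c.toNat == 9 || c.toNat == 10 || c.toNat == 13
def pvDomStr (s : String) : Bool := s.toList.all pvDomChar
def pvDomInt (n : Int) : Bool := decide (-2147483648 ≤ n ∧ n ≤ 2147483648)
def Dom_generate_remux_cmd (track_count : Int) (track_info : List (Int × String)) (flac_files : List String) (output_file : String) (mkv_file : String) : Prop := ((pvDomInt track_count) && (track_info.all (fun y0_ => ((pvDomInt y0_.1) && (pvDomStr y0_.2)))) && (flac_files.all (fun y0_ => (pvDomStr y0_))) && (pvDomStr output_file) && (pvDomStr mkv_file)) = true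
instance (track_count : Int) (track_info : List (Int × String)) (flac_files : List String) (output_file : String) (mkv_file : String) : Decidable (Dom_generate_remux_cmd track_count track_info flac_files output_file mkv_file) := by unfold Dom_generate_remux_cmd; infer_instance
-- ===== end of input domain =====

-- B replaces A's per-index membership scan of range(track_count+1) by sorting the PCM track
-- numbers from the dict keys once and then MERGING: runs of gap entries '0:j' are emitted
-- between consecutive sorted PCM tracks; audio list and language options come straight from
-- the sorted list ("alternative"; same order of cost).

-- shared primitive: Python dict membership/lookup on an association list (first match)
def lk {α : Type} (l : List (Int × α)) (i : Int) : Option α :=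
  match l with
  | [] => none
  | (k, v) :: rest => if k == i then some v else lk rest i

-- ===== PORT A =====
-- loop body of A: state = (tracker_order, audio_tracks, pcm_track_count, language_options);
-- the three list accumulators are kept in REVERSE (Python's tail append = cons here) and
-- reversed back before joining — same values, linear-time evaluation
def gstep (ti : List (Int × String)) (ff : List String)
    (st : List String × List String × Int × List String) (i : Int) :
    List String × List String × Int × List String :=
  match st with
  | (to_, at_, pc, lo) =>
    match lk ti i with
    | some v =>
        ((PySem.Int.toStr (pc + 1) ++ ":0") :: to_,
         PySem.Int.toStr i :: at_,
         pc + 1,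
         ("--language 0:" ++ v ++ " \"" ++ (PySem.List.pyGet? ff (pc + 1 - 1)).getD "" ++ "\"") :: lo)
    | none => (("0:" ++ PySem.Int.toStr i) :: to_, at_, pc, lo)

def generate_remux_cmd (track_count : Int) (track_info : List (Int × String)) (flac_files : List String) (output_file : String) (mkv_file : String) : String :=
  let res := (PySem.List.pyRange 0 (track_count + 1) 1).foldl (gstep track_info flac_files) ([], [], 0, [])
  "mkvmerge -o \"" ++ output_file ++ "\" --track-order " ++ PySem.Str.join "," res.1.reverse
    ++ " -a " ++ ("!" ++ PySem.Str.join "," res.2.1.reverse) ++ " \"" ++ mkv_file ++ "\" "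
    ++ PySem.Str.join " " res.2.2.2.reverse

-- ===== PORT B =====
-- loop body of B: state = (parts, prev); each step appends the gap run '0:prev' … '0:(t-1)'
-- and this track's 'rank:0' entry, and moves prev past t
def bstep (st : List String × Int) (p : Int × Int) : List String × Int :=
  (st.1 ++ (PySem.List.pyRange st.2 p.2 1).map (fun j => "0:" ++ PySem.Int.toStr j)
        ++ [PySem.Int.toStr p.1 ++ ":0"],
   p.2 + 1)

def generate_remux_cmd_alt (track_count : Int) (track_info : List (Int × String)) (flac_files : List String) (output_file : String) (mkv_file : String) : String :=
  -- pcm = sorted({k for k in track_info if 0 <= k <= track_count})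
  let pcm := PySem.List.sorted
    (PySem.Set.ofList ((track_info.map (fun p => p.1)).filter (fun k => decide (0 ≤ k ∧ k ≤ track_count))))
    (fun x => x) false
  let st := (PySem.List.enumerate pcm 1).foldl bstep ([], 0)
  let parts := st.1 ++ (PySem.List.pyRange st.2 (track_count + 1) 1).map (fun j => "0:" ++ PySem.Int.toStr j)
  let tracker_order := PySem.Str.join "," parts
  let audio_tracks := "!" ++ PySem.Str.join "," (pcm.map PySem.Int.toStr)
  let language_options := PySem.Str.join " " ((PySem.List.enumerate pcm 0).map (fun p =>
      "--language 0:" ++ (lk track_info p.2).getD "" ++ " \"" ++ (PySem.List.pyGet? flac_files p.1).getD "" ++ "\""))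
  "mkvmerge -o \"" ++ output_file ++ "\" --track-order " ++ tracker_order
    ++ " -a " ++ audio_tracks ++ " \"" ++ mkv_file ++ "\" " ++ language_options

-- ===== PRECONDITION & SPEC =====
-- Pre_ excludes exactly the inputs on which Python A raises IndexError: fewer flac files than
-- PCM tracks (keys of track_info hit by range(track_count+1)).
def Pre_generate_remux_cmd (track_count : Int) (track_info : List (Int × String)) (flac_files : List String) (output_file : String) (mkv_file : String) : Prop :=
  ((PySem.Set.ofList (track_info.map (fun p => p.1))).countP (fun k => decide (0 ≤ k ∧ k ≤ track_count))) ≤ flac_files.length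
instance (track_count : Int) (track_info : List (Int × String)) (flac_files : List String) (output_file : String) (mkv_file : String) : Decidable (Pre_generate_remux_cmd track_count track_info flac_files output_file mkv_file) := by unfold Pre_generate_remux_cmd; infer_instance

def pvWitness_generate_remux_cmd : Int × (List (Int × String)) × List String × String × String :=
  (2, [(0, "eng"), (2, "jpn")], ["a.flac", "b.flac"], "out.mkv", "in.mkv")

def Spec_generate_remux_cmd (track_count : Int) (track_info : List (Int × String)) (flac_files : List String) (output_file : String) (mkv_file : String) (out : String) : Prop := out = generate_remux_cmd_alt track_count track_info flac_files output_file mkv_file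
instance (track_count : Int) (track_info : List (Int × String)) (flac_files : List String) (output_file : String) (mkv_file : String) (out : String) : Decidable (Spec_generate_remux_cmd track_count track_info flac_files output_file mkv_file out) := by unfold Spec_generate_remux_cmd; infer_instance

-- ===== CLAIM (what is proved, stated in full; the proofs are below) =====
def Claim_equal_generate_remux_cmd : Prop := ∀ (track_count : Int) (track_info : List (Int × String)) (flac_files : List String) (output_file : String) (mkv_file : String), Dom_generate_remux_cmd track_count track_info flac_files output_file mkv_file → Pre_generate_remux_cmd track_count track_info flac_files output_file mkv_file → Spec_generate_remux_cmd track_count track_info flac_files output_file mkv_file (generate_remux_cmd track_count track_info flac_files output_file mkv_file)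

-- ===== LEMMAS AND PROOFS =====

-- specification helpers: what A's loop accumulates, stated recursively
def trkS (ti : List (Int × String)) (l : List Int) (c : Int) : List String :=
  match l with
  | [] => []
  | i :: rest =>
    if (lk ti i).isSome then (PySem.Int.toStr (c + 1) ++ ":0") :: trkS ti rest (c + 1)
    else ("0:" ++ PySem.Int.toStr i) :: trkS ti rest c

def langS (ti : List (Int × String)) (ff : List String) (l : List Int) (c : Int) : List String :=
  match l with
  | [] => []
  | i :: rest =>
    match lk ti i with
    | some v => ("--language 0:" ++ v ++ " \"" ++ (PySem.List.pyGet? ff c).getD "" ++ "\"") :: langS ti ff rest (c + 1)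
    | none => langS ti ff rest c

def langP (ti : List (Int × String)) (ff : List String) (pl : List Int) (c : Int) : List String :=
  match pl with
  | [] => []
  | i :: rest =>
    ("--language 0:" ++ (lk ti i).getD "" ++ " \"" ++ (PySem.List.pyGet? ff c).getD "" ++ "\"") :: langP ti ff rest (c + 1)

-- what B's merge loop produces, stated recursively (the tail gap run folded in)
def wlk (a b : Int) (pcm : List Int) (r : Int) : List String :=
  match pcm with
  | [] => (PySem.List.pyRange a b 1).map (fun j => "0:" ++ PySem.Int.toStr j)
  | t :: rest =>
    (PySem.List.pyRange a t 1).map (fun j => "0:" ++ PySem.Int.toStr j)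
      ++ (PySem.Int.toStr r ++ ":0") :: wlk (t + 1) b rest (r + 1)

theorem foldA (ti : List (Int × String)) (ff : List String) :
    ∀ (l : List Int) (to_ at_ : List String) (pc : Int) (lo : List String),
      l.foldl (gstep ti ff) (to_, at_, pc, lo) =
        ((trkS ti l pc).reverse ++ to_,
         ((l.filter (fun i => (lk ti i).isSome)).map PySem.Int.toStr).reverse ++ at_,
         pc + ((l.filter (fun i => (lk ti i).isSome)).length : Int),
         (langS ti ff l pc).reverse ++ lo) := by
  intro l
  induction l with
  | nil => intro to_ at_ pc lo; simp [trkS, langS]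
  | cons i rest ih =>
    intro to_ at_ pc lo
    cases h : lk ti i with
    | some v =>
      simp only [List.foldl_cons, gstep, h, ih]
      simp [trkS, langS, h, Prod.ext_iff, List.reverse_cons, List.append_assoc]
      omega
    | none =>
      simp only [List.foldl_cons, gstep, h, ih]
      simp [trkS, langS, h, List.reverse_cons, List.append_assoc]

theorem langS_eq (ti : List (Int × String)) (ff : List String) :
    ∀ (l : List Int) (c : Int),
      langS ti ff l c = langP ti ff (l.filter (fun i => (lk ti i).isSome)) c := by
  intro l
  induction l with
  | nil => intro c; simp [langS, langP]
  | cons i rest ih =>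
    intro c
    cases h : lk ti i with
    | some v => simp [langS, langP, h, ih]
    | none => simp [langS, h, ih]

theorem enum_map_langP (ti : List (Int × String)) (ff : List String) :
    ∀ (pl : List Int) (s : Int),
      (PySem.List.enumerate pl s).map (fun p =>
          "--language 0:" ++ (lk ti p.2).getD "" ++ " \"" ++ (PySem.List.pyGet? ff p.1).getD "" ++ "\"") =
        langP ti ff pl s := by
  intro pl
  induction pl with
  | nil => intro s; simp [langP]
  | cons i rest ih => intro s; simp [PySem.List.enumerate_cons, langP, ih]

-- dict membership: '_ in track_info' is 'lk returns a value' is 'key occurs'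
theorem lk_isSome_iff {α : Type} : ∀ (l : List (Int × α)) (i : Int),
    (lk l i).isSome = true ↔ i ∈ l.map (fun p => p.1) := by
  intro l
  induction l with
  | nil => intro i; simp [lk]
  | cons p rest ih =>
    intro i
    by_cases h : p.1 = i
    · simp [lk, h]
    · simp only [lk]
      rw [if_neg (by simp [h])]
      rw [ih]
      simp only [List.map_cons, List.mem_cons]
      exact ⟨fun hm => Or.inr hm, fun hm => hm.elim (fun e => absurd e.symm h) id⟩

-- B's pcm IS the range order A visits the PCM tracks in: the sorted distinct in-range keys
theorem pcm_eq (ti : List (Int × String)) (tc : Int) :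
    PySem.List.sorted
        (PySem.Set.ofList ((ti.map (fun p => p.1)).filter (fun k => decide (0 ≤ k ∧ k ≤ tc))))
        (fun x => x) false =
      (PySem.List.pyRange 0 (tc + 1) 1).filter (fun i => (lk ti i).isSome) := by
  apply PySem.List.sorted_eq_of_perm_of_pairwise_lt
  · apply (List.perm_ext_iff_of_nodup _ (PySem.Set.nodup_ofList _)).mpr
    · intro x
      simp only [List.mem_filter, PySem.Set.mem_ofList, PySem.List.mem_pyRange_one,
        lk_isSome_iff, decide_eq_true_eq]
      constructor
      · rintro ⟨⟨hlo, hhi⟩, hk⟩; exact ⟨hk, hlo, by omega⟩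
      · rintro ⟨hk, hlo, hhi⟩; exact ⟨⟨hlo, by omega⟩, hk⟩
    · exact (PySem.List.nodup_pyRange_one 0 (tc + 1)).filter _
  · exact (PySem.List.pairwise_lt_pyRange_one 0 (tc + 1)).filter _

-- B's fold plus the trailing gap run is wlk (pure list algebra, no side conditions)
theorem foldB : ∀ (pcm : List Int) (acc : List String) (prev r b : Int),
    (let st := (PySem.List.enumerate pcm r).foldl bstep (acc, prev);
     st.1 ++ (PySem.List.pyRange st.2 b 1).map (fun j => "0:" ++ PySem.Int.toStr j)) =
      acc ++ wlk prev b pcm r := by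
  intro pcm
  induction pcm with
  | nil => intro acc prev r b; simp [wlk]
  | cons t rest ih =>
    intro acc prev r b
    simp only [PySem.List.enumerate_cons, List.foldl_cons, bstep]
    rw [ih]
    simp [wlk]

-- the merge produces exactly A's per-index tracker entries
theorem wlk_eq (ti : List (Int × String)) : ∀ (n : Nat) (a b c : Int), (b - a).toNat = n →
    wlk a b ((PySem.List.pyRange a b 1).filter (fun i => (lk ti i).isSome)) (c + 1) =
      trkS ti (PySem.List.pyRange a b 1) c := by
  intro n
  induction n with
  | zero =>
    intro a b c hn
    have hnil : PySem.List.pyRange a b 1 = [] := PySem.List.pyRange_one_eq_nil (by omega)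
    rw [hnil]
    simp [wlk, trkS, hnil]
  | succ m ih =>
    intro a b c hn
    have hab : a < b := by omega
    rw [PySem.List.pyRange_one_cons hab]
    have hn' : (b - (a + 1)).toNat = m := by omega
    cases h : lk ti a with
    | some v =>
      have hnil : PySem.List.pyRange a a 1 = [] := PySem.List.pyRange_one_eq_nil (le_refl a)
      rw [List.filter_cons_of_pos (by simp [h]), wlk, hnil,
        ih (a + 1) b (c + 1) hn']
      simp [trkS, h]
    | none =>
      have hfil : (a :: PySem.List.pyRange (a + 1) b 1).filter (fun i => (lk ti i).isSome) =
          (PySem.List.pyRange (a + 1) b 1).filter (fun i => (lk ti i).isSome) := by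
        simp [h]
      rw [hfil]
      have hstep : wlk a b ((PySem.List.pyRange (a + 1) b 1).filter (fun i => (lk ti i).isSome)) (c + 1) =
          ("0:" ++ PySem.Int.toStr a) ::
            wlk (a + 1) b ((PySem.List.pyRange (a + 1) b 1).filter (fun i => (lk ti i).isSome)) (c + 1) := by
        cases hf : (PySem.List.pyRange (a + 1) b 1).filter (fun i => (lk ti i).isSome) with
        | nil =>
          simp only [wlk]
          rw [PySem.List.pyRange_one_cons hab]
          simp
        | cons t rest =>
          have ht : a + 1 ≤ t := by
            have : t ∈ (PySem.List.pyRange (a + 1) b 1).filter (fun i => (lk ti i).isSome) := by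
              rw [hf]; exact List.mem_cons_self
            exact ((PySem.List.mem_pyRange_one).mp (List.mem_of_mem_filter this)).1
          simp only [wlk]
          rw [PySem.List.pyRange_one_cons (by omega : a < t)]
          simp
      rw [hstep, ih (a + 1) b c hn']
      simp [trkS, h]

-- ===== VERDICT (by name: the statement is the Claim_ definition above) =====
theorem generate_remux_cmd_spec : Claim_equal_generate_remux_cmd := by
  intro tc ti ff of mf _ _
  unfold Spec_generate_remux_cmd generate_remux_cmd generate_remux_cmd_alt
  rw [foldA]
  simp only [pcm_eq, foldB, List.nil_append]
  have h1 : trkS ti (PySem.List.pyRange 0 (tc + 1) 1) 0 =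
      wlk 0 (tc + 1) ((PySem.List.pyRange 0 (tc + 1) 1).filter (fun i => (lk ti i).isSome)) 1 := by
    have := wlk_eq ti (tc + 1 - 0).toNat 0 (tc + 1) 0 rfl
    simpa using this.symm
  have h2 : langS ti ff (PySem.List.pyRange 0 (tc + 1) 1) 0 =
      (PySem.List.enumerate ((PySem.List.pyRange 0 (tc + 1) 1).filter (fun i => (lk ti i).isSome)) 0).map (fun p =>
        "--language 0:" ++ (lk ti p.2).getD "" ++ " \"" ++ (PySem.List.pyGet? ff p.1).getD "" ++ "\"") := by
    rw [langS_eq, enum_map_langP]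
  simp only [List.append_nil, List.reverse_reverse, h1, h2]
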